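-- pv_equiv track=rewrite | github.com/DanMayhem/project_euler | 051.py | enumerate_n_digit_starred_numbers
-- ===== SOURCE A (Python) =====
-- def enum_with_addl_char(s,c):
-- 	for i in range(len(s)):
-- 		if s[i]!=c:
-- 			yield s[:i]+c+s[i:]
-- 	yield s+c
--
-- def enum_with_addl_digit(s):
-- 	for d in range(10):
-- 		for i in enum_with_addl_char(s,str(d)):
-- 			yield i
--
-- def is_all_stars(s):
-- 	ss = set(s)
-- 	return len(ss)==1 and '*' in ss
--
-- def has_leading_zero(s):
-- 	return s[0]=='0'
--
-- def is_yieldable(s):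
-- 	return not(has_leading_zero(s))
--
-- def enumerate_n_digit_starred_numbers(n):
-- 	if n < 2:
-- 		yield '*'
-- 		return
-- 	for i in enumerate_n_digit_starred_numbers(n-1):
-- 		for j in enum_with_addl_char(i,'*'):
-- 			if is_yieldable(j):
-- 				yield j
-- 		if is_all_stars(i):
-- 			for j in enum_with_addl_digit(i):
-- 				if is_yieldable(j):
-- 					yield j
-- ===== SOURCE B (Python) =====
-- def _with_char(s, c):
--     # all ways to insert c into s at a position whose current char differs,
--     # plus appending c at the end, in left-to-right order (recursive decomposition)
--     if not s:
--         return [c]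
--     rest = [s[0] + t for t in _with_char(s[1:], c)]
--     if s[0] != c:
--         return [c + s] + rest
--     return rest
--
-- def enumerate_n_digit_starred_numbers(n):
--     level = ['*']
--     for _ in range(2, n + 1):
--         nxt = []
--         for p in level:
--             nxt.extend(q for q in _with_char(p, '*') if q[0] != '0')
--             if set(p) == {'*'}:
--                 for d in '0123456789':
--                     nxt.extend(q for q in _with_char(p, d) if q[0] != '0')
--         level = nxt
--     for p in level:
--         yield p
-- ===== Notes on version B (the rewrite author's own statement) =====
-- stated objective: alternative
-- what changed: A's depth-n chain of recursive generators (with index-based slicing insertion and a set-length all-stars test) is replaced by an iterative bottom-up loop that builds each level from the previous one with a structurally recursive insertion helper; same exponential output size, so no speed claim.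
import Mathlib
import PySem

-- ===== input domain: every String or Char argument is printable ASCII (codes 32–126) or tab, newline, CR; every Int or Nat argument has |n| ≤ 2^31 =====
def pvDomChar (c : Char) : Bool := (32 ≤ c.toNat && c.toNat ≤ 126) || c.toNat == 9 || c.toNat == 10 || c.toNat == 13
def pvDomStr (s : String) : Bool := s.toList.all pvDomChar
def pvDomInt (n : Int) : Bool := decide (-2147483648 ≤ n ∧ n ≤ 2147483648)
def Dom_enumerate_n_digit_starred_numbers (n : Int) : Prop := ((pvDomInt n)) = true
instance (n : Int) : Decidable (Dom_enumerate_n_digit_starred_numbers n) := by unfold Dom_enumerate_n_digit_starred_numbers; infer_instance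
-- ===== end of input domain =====

-- B replaces A's recursive generator pipeline by an iterative bottom-up level builder
-- (and a structurally recursive insertion helper); objective: alternative decomposition, not speed.

-- ===== PORT A =====
-- strings are ported as List Char; index i runs over range(len(s)) so s[i]/s[:i]/s[i:]
-- are exact as getD/take/drop (0 ≤ i < len s)
def pvEnumWithAddlChar (s c : List Char) : List (List Char) :=
  ((List.range s.length).filterMap fun i =>
    if [s.getD i ' '] ≠ c then some (s.take i ++ c ++ s.drop i) else none)
  ++ [s ++ c]

def pvEnumWithAddlDigit (s : List Char) : List (List Char) :=
  (PySem.List.pyRange 0 10 1).flatMap fun d => pvEnumWithAddlChar s (PySem.Int.toChars d)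

def pvIsAllStars (s : List Char) : Bool :=
  let ss := PySem.Set.ofList s
  ss.length == 1 && PySem.Set.contains ss '*'

-- s[0] == '0'; exact via getD since every string reaching it is nonempty
def pvHasLeadingZero (s : List Char) : Bool := s.getD 0 ' ' == '0'

def pvIsYieldable (s : List Char) : Bool := !(pvHasLeadingZero s)

-- the body of A's outer for-loop over the recursive call
def pvExpandA (i : List Char) : List (List Char) :=
  (pvEnumWithAddlChar i ['*']).filter pvIsYieldable
  ++ (if pvIsAllStars i then (pvEnumWithAddlDigit i).filter pvIsYieldable else [])

def pvLevelA (n : Int) : List (List Char) :=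
  if n < 2 then [['*']]
  else (pvLevelA (n - 1)).flatMap pvExpandA
termination_by n.toNat
decreasing_by omega

def enumerate_n_digit_starred_numbers (n : Int) : List String :=
  (pvLevelA n).map fun cs => String.ofList cs

-- ===== PORT B =====
def pvWithChar (s : List Char) (c : Char) : List (List Char) :=
  match s with
  | [] => [[c]]
  | x :: t =>
    let rest := (pvWithChar t c).map fun q => x :: q
    if x ≠ c then (c :: x :: t) :: rest else rest

def pvStepB (level : List (List Char)) : List (List Char) :=
  level.foldl (fun nxt p =>
    nxt ++ (pvWithChar p '*').filter (fun q => !(q.getD 0 ' ' == '0'))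
      ++ (if PySem.Set.equal (PySem.Set.ofList p) (PySem.Set.ofList ['*']) then
            ['0','1','2','3','4','5','6','7','8','9'].flatMap fun d =>
              (pvWithChar p d).filter (fun q => !(q.getD 0 ' ' == '0'))
          else [])) []

def enumerate_n_digit_starred_numbers_alt (n : Int) : List String :=
  ((PySem.List.pyRange 2 (n + 1) 1).foldl (fun lvl _ => pvStepB lvl) [['*']]).map
    fun cs => String.ofList cs

-- ===== PRECONDITION & SPEC =====
-- A consumes an n-deep chain of nested generators, so CPython raises RecursionError once n
-- reaches the interpreter's recursion limit; Pre_ excludes only such huge n (A never returns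
-- a value there), keeping every input A returns on.
def Pre_enumerate_n_digit_starred_numbers (n : Int) : Prop := n ≤ 9000
instance (n : Int) : Decidable (Pre_enumerate_n_digit_starred_numbers n) := by unfold Pre_enumerate_n_digit_starred_numbers; infer_instance
def pvWitness_enumerate_n_digit_starred_numbers : Int := (3)

def Spec_enumerate_n_digit_starred_numbers (n : Int) (out : List String) : Prop := out = enumerate_n_digit_starred_numbers_alt n
instance (n : Int) (out : List String) : Decidable (Spec_enumerate_n_digit_starred_numbers n out) := by unfold Spec_enumerate_n_digit_starred_numbers; infer_instance

-- ===== CLAIM (what is proved, stated in full; the proofs are below) =====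
def Claim_equal_enumerate_n_digit_starred_numbers : Prop := ∀ (n : Int), Dom_enumerate_n_digit_starred_numbers n → Pre_enumerate_n_digit_starred_numbers n → Spec_enumerate_n_digit_starred_numbers n (enumerate_n_digit_starred_numbers n)

-- ===== LEMMAS AND PROOFS =====

-- A's index-based insertion enumerator satisfies B's structural recursion
lemma pvEnumA_nil (c : List Char) : pvEnumWithAddlChar [] c = [c] := by
  simp [pvEnumWithAddlChar]

lemma pvEnumA_cons (x : Char) (t : List Char) (c : List Char) :
    pvEnumWithAddlChar (x :: t) c =
      (if [x] ≠ c then [c ++ x :: t] else [])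
        ++ (pvEnumWithAddlChar t c).map (fun q => x :: q) := by
  unfold pvEnumWithAddlChar
  rw [List.length_cons, List.range_succ_eq_map, List.filterMap_cons, List.filterMap_map]
  have h1 : ((List.range t.length).filterMap fun i =>
      if [(x :: t).getD (i + 1) ' '] ≠ c then
        some ((x :: t).take (i + 1) ++ c ++ (x :: t).drop (i + 1)) else none)
      = ((List.range t.length).filterMap fun i =>
      if [t.getD i ' '] ≠ c then some (t.take i ++ c ++ t.drop i) else none).map
        (fun q => x :: q) := by
    rw [List.map_filterMap]
    apply List.filterMap_congr
    intro i _
    by_cases h : [t[i]?.getD ' '] = c <;> simp [List.getD_eq_getElem?_getD, h]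
  by_cases hx : [x] = c <;> simp [hx] <;> simp_all

lemma pvWithChar_eq (c : Char) : ∀ s, pvWithChar s c = pvEnumWithAddlChar s [c] := by
  intro s
  induction s with
  | nil => simp [pvWithChar, pvEnumA_nil]
  | cons x t ih =>
    rw [pvEnumA_cons]
    by_cases hx : x = c <;> simp [pvWithChar, hx, ih]

-- the two all-stars tests agree
lemma pvStars_eq (s : List Char) :
    pvIsAllStars s = PySem.Set.equal (PySem.Set.ofList s) (PySem.Set.ofList ['*']) := by
  rw [Bool.eq_iff_iff]
  unfold pvIsAllStars
  simp only [Bool.and_eq_true, beq_iff_eq, PySem.Set.contains_iff, PySem.Set.equal_iff]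
  have hnd := PySem.Set.nodup_ofList (xs := s)
  constructor
  · rintro ⟨hlen, hmem⟩
    have h1 : PySem.Set.ofList s = ['*'] := by
      rcases h : PySem.Set.ofList s with _ | ⟨a, _ | ⟨b, v⟩⟩
      · simp [h] at hlen
      · rw [h] at hmem; simp at hmem; rw [← hmem]
      · simp [h] at hlen
    simp [h1]
  · intro h
    have hstar : '*' ∈ PySem.Set.ofList s := by
      rw [h '*']; simp [PySem.Set.mem_ofList]
    have h1 : PySem.Set.ofList s = ['*'] := by
      rcases hl : PySem.Set.ofList s with _ | ⟨a, _ | ⟨b, v⟩⟩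
      · rw [hl] at hstar; simp at hstar
      · have ha : a = '*' := by
          have h2 := (h a).1 (by rw [hl]; simp)
          simpa [PySem.Set.mem_ofList] using h2
        rw [ha]
      · have ha : a = '*' := by
          have h2 := (h a).1 (by rw [hl]; simp)
          simpa [PySem.Set.mem_ofList] using h2
        have hb : b = '*' := by
          have h2 := (h b).1 (by rw [hl]; simp)
          simpa [PySem.Set.mem_ofList] using h2
        rw [hl] at hnd
        simp [ha, hb] at hnd
    simp [h1]

-- the digit characters
lemma pvDigits_eq (p : List Char) :
    (pvEnumWithAddlDigit p).filter pvIsYieldable =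
      ['0','1','2','3','4','5','6','7','8','9'].flatMap fun d =>
        (pvWithChar p d).filter (fun q => !(q.getD 0 ' ' == '0')) := by
  have hr : PySem.List.pyRange 0 10 1 = [0,1,2,3,4,5,6,7,8,9] := by decide
  have hy : (fun q : List Char => !(q.getD 0 ' ' == '0')) = pvIsYieldable := rfl
  simp only [pvEnumWithAddlDigit, hr, hy, List.flatMap_cons, List.flatMap_nil,
    List.filter_append, List.append_nil, pvWithChar_eq]
  rfl

-- the per-element expansions agree
lemma pvExpand_eq (p : List Char) :
    pvExpandA p =
      (pvWithChar p '*').filter (fun q => !(q.getD 0 ' ' == '0'))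
        ++ (if PySem.Set.equal (PySem.Set.ofList p) (PySem.Set.ofList ['*']) then
              ['0','1','2','3','4','5','6','7','8','9'].flatMap fun d =>
                (pvWithChar p d).filter (fun q => !(q.getD 0 ' ' == '0'))
            else []) := by
  unfold pvExpandA
  rw [← pvStars_eq]
  congr 1
  · rw [← pvWithChar_eq]; rfl
  · by_cases h : pvIsAllStars p
    · rw [if_pos h, if_pos h, pvDigits_eq]
    · rw [if_neg (by simp [h]), if_neg (by simp [h])]

-- B's accumulator loop is A's flatMap
lemma pvStep_eq (l : List (List Char)) : l.flatMap pvExpandA = pvStepB l := by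
  unfold pvStepB
  have hfun : (fun (nxt : List (List Char)) (p : List Char) =>
      nxt ++ (pvWithChar p '*').filter (fun q => !(q.getD 0 ' ' == '0'))
        ++ (if PySem.Set.equal (PySem.Set.ofList p) (PySem.Set.ofList ['*']) then
              ['0','1','2','3','4','5','6','7','8','9'].flatMap fun d =>
                (pvWithChar p d).filter (fun q => !(q.getD 0 ' ' == '0'))
            else []))
      = fun nxt p => nxt ++ pvExpandA p := by
    funext nxt p
    rw [pvExpand_eq, List.append_assoc]
  rw [hfun, PySem.List.foldl_append_eq_flatMap, List.nil_append]

-- the recursion equals the bottom-up fold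
lemma pvLevel_eq : ∀ n : Int,
    pvLevelA n = (PySem.List.pyRange 2 (n + 1) 1).foldl (fun lvl _ => pvStepB lvl) [['*']] := by
  intro n
  induction n using pvLevelA.induct with
  | case1 n h =>
    rw [pvLevelA, if_pos h, PySem.List.pyRange_one_eq_nil (by omega)]
    rfl
  | case2 n h ih =>
    rw [pvLevelA, if_neg h, pvStep_eq,
      PySem.List.pyRange_one_succ_right (a := 2) (b := n) (by omega),
      List.foldl_append]
    have hn : n - 1 + 1 = n := by omega
    rw [hn] at ih
    rw [ih]
    rfl

-- ===== VERDICT (by name: the statement is the Claim_ definition above) =====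
theorem enumerate_n_digit_starred_numbers_spec : Claim_equal_enumerate_n_digit_starred_numbers := by
  intro n _ _
  unfold Spec_enumerate_n_digit_starred_numbers enumerate_n_digit_starred_numbers
    enumerate_n_digit_starred_numbers_alt
  rw [pvLevel_eq]
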